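-- pv_equiv track=rewrite | github.com/Floodnut/Algorithm | baekjoon/dp/1463.py | solution
-- ===== SOURCE A (Python) =====
-- def solution(n):
--     i = 0
--     memo = [[n]]
--
--     while True:
--         if 1 in memo[i]:
--             return i
--
--         memo.append([])
--         for j in range(len(memo[i])):
--             if memo[i][j] % 3 == 0:
--                 memo[i+1].append(memo[i][j] // 3)
--             if memo[i][j] % 2 == 0:
--                 memo[i+1].append(memo[i][j] // 2)
--             if memo[i][j] - 1 > 0:
--                 memo[i+1].append(memo[i][j] - 1)
--         i += 1
-- ===== SOURCE B (Python) =====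
-- def solution(n):
--     if n <= 1:
--         return 0
--     dp = [0, 0]
--     for i in range(2, n + 1):
--         best = dp[i - 1] + 1
--         if i % 2 == 0:
--             best = min(best, dp[i // 2] + 1)
--         if i % 3 == 0:
--             best = min(best, dp[i // 3] + 1)
--         dp.append(best)
--     return dp[n]
-- ===== Notes on version B (the rewrite author's own statement) =====
-- stated objective: alternative
-- what changed: Replaces A's breadth-first layer expansion (building lists of all values reachable in i steps until 1 appears) with the standard bottom-up DP dp[i] = 1 + min(dp[i-1], dp[i//2] if 2|i, dp[i//3] if 3|i); B trades A's output-sensitive layer growth for a guaranteed O(n) table.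
-- outside the precondition, e.g. on solution(0): A does not finish within the time limit, B returns 0
import Mathlib
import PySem

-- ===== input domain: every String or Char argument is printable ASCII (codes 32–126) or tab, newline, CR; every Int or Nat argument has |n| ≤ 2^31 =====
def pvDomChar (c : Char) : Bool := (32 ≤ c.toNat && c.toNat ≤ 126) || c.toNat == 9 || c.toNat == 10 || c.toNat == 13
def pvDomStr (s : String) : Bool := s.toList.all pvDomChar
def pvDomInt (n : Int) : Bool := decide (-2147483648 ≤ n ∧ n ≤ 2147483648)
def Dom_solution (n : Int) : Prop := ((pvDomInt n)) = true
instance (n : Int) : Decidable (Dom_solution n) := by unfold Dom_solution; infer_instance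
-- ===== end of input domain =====

-- B replaces A's breadth-first layer expansion by the standard bottom-up DP
-- dp[i] = 1 + min(dp[i-1], dp[i//2] if 2∣i, dp[i//3] if 3∣i); objective: alternative algorithm.

-- ===== PORT A =====
-- one BFS layer: for each element append x//3 (if 3∣x), x//2 (if 2∣x), x-1 (if x-1>0), in order
def nextLayer (L : List Int) : List Int :=
  L.foldl (fun acc x =>
    let acc1 := if PySem.Int.mod x 3 = 0 then acc ++ [PySem.Int.floordiv x 3] else acc
    let acc2 := if PySem.Int.mod x 2 = 0 then acc1 ++ [PySem.Int.floordiv x 2] else acc1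
    if x - 1 > 0 then acc2 ++ [x - 1] else acc2) []

-- the 'while True' loop; fuel bounds the iterations (n iterations always suffice for n ≥ 1,
-- since subtracting 1 reaches 1 in n-1 steps; for n ≤ 0 the Python loops forever — excluded by Pre_)
def loopA : List Int → Int → Nat → Int
  | _, i, 0 => i
  | L, i, fuel+1 => if (1 : Int) ∈ L then i else loopA (nextLayer L) (i + 1) fuel

def solution (n : Int) : Int := loopA [n] 0 (n.toNat + 1)

-- ===== PORT B =====
-- one iteration of B's dp loop (dp.append(best))
def dpStep (dp : Array Int) (i : Int) : Array Int :=
  let b1 := dp.getD (i - 1).toNat 0 + 1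
  let b2 := if PySem.Int.mod i 2 = 0 then min b1 (dp.getD (PySem.Int.floordiv i 2).toNat 0 + 1) else b1
  let b3 := if PySem.Int.mod i 3 = 0 then min b2 (dp.getD (PySem.Int.floordiv i 3).toNat 0 + 1) else b2
  dp.push b3

def solution_alt (n : Int) : Int :=
  if n ≤ 1 then 0
  else ((PySem.List.pyRange 2 (n + 1) 1).foldl dpStep #[0, 0]).getD n.toNat 0

-- ===== PRECONDITION & SPEC =====
-- Pre_ excludes n ≤ 0, on which A's while-loop never finds 1 and diverges (no value is returned).
def Pre_solution (n : Int) : Prop := 1 ≤ n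
instance (n : Int) : Decidable (Pre_solution n) := by unfold Pre_solution; infer_instance
def pvWitness_solution : Int := 10

def Spec_solution (n : Int) (out : Int) : Prop := out = solution_alt n
instance (n : Int) (out : Int) : Decidable (Spec_solution n out) := by unfold Spec_solution; infer_instance

-- ===== CLAIM (what is proved, stated in full; the proofs are below) =====
def Claim_equal_solution : Prop := ∀ (n : Int), Dom_solution n → Pre_solution n → Spec_solution n (solution n)

-- ===== LEMMAS AND PROOFS =====

-- the mathematical value both programs compute: min ops to bring n down to 1
def mRec : Nat → Nat
  | 0 => 0
  | 1 => 0
  | (m+2) =>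
      let b1 := mRec (m+1) + 1
      let b2 := if (m+2) % 2 = 0 then min b1 (mRec ((m+2)/2) + 1) else b1
      let b3 := if (m+2) % 3 = 0 then min b2 (mRec ((m+2)/3) + 1) else b2
      b3
  decreasing_by
  · omega
  · exact Nat.div_lt_self (by omega) (by omega)
  · exact Nat.div_lt_self (by omega) (by omega)

lemma mRec_two (m : Nat) : mRec (m+2) =
    (let b1 := mRec (m+1) + 1
     let b2 := if (m+2) % 2 = 0 then min b1 (mRec ((m+2)/2) + 1) else b1
     if (m+2) % 3 = 0 then min b2 (mRec ((m+2)/3) + 1) else b2) := by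
  rw [mRec]

-- x reachable to 1 in exactly k steps of the three operations
inductive Reach : Int → Nat → Prop
  | one : Reach 1 0
  | div3 {x : Int} {k : Nat} : PySem.Int.mod x 3 = 0 → Reach (PySem.Int.floordiv x 3) k → Reach x (k+1)
  | div2 {x : Int} {k : Nat} : PySem.Int.mod x 2 = 0 → Reach (PySem.Int.floordiv x 2) k → Reach x (k+1)
  | sub1 {x : Int} {k : Nat} : x - 1 > 0 → Reach (x - 1) k → Reach x (k+1)

lemma fdiv3_eq (x : Int) (hx : 0 ≤ x) : PySem.Int.floordiv x 3 = ((x.toNat / 3 : Nat) : Int) := by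
  rw [PySem.Int.floordiv_eq_ediv_of_pos (by norm_num)]; omega

lemma fdiv2_eq (x : Int) (hx : 0 ≤ x) : PySem.Int.floordiv x 2 = ((x.toNat / 2 : Nat) : Int) := by
  rw [PySem.Int.floordiv_eq_ediv_of_pos (by norm_num)]; omega

lemma mod3_iff (x : Int) (hx : 0 ≤ x) : PySem.Int.mod x 3 = 0 ↔ x.toNat % 3 = 0 := by
  rw [PySem.Int.mod_eq_emod_of_pos (by norm_num)]; omega

lemma mod2_iff (x : Int) (hx : 0 ≤ x) : PySem.Int.mod x 2 = 0 ↔ x.toNat % 2 = 0 := by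
  rw [PySem.Int.mod_eq_emod_of_pos (by norm_num)]; omega

lemma mod2_nat (n : Nat) : PySem.Int.mod ((n : Nat) : Int) 2 = 0 ↔ n % 2 = 0 := by
  rw [mod2_iff _ (by positivity)]; simp

lemma mod3_nat (n : Nat) : PySem.Int.mod ((n : Nat) : Int) 3 = 0 ↔ n % 3 = 0 := by
  rw [mod3_iff _ (by positivity)]; simp

lemma fdiv2_nat (n : Nat) : PySem.Int.floordiv ((n : Nat) : Int) 2 = ((n / 2 : Nat) : Int) := by
  rw [fdiv2_eq _ (by positivity)]; simp

lemma fdiv3_nat (n : Nat) : PySem.Int.floordiv ((n : Nat) : Int) 3 = ((n / 3 : Nat) : Int) := by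
  rw [fdiv3_eq _ (by positivity)]; simp

lemma reach_pos {x : Int} {k : Nat} (h : Reach x k) : 1 ≤ x := by
  induction h with
  | one => norm_num
  | @div3 x k hm _ ih =>
      have h := PySem.Int.floordiv_mul_add_mod x 3
      rw [hm] at h
      omega
  | @div2 x k hm _ ih =>
      have h := PySem.Int.floordiv_mul_add_mod x 2
      rw [hm] at h
      omega
  | @sub1 x k hp _ _ => omega

lemma reach_m : ∀ n : Nat, 1 ≤ n → Reach (n : Int) (mRec n) := by
  intro n
  induction n using Nat.strong_induction_on with
  | _ n ih =>
    intro hn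
    match n, hn with
    | 1, _ => simpa [mRec] using Reach.one
    | (m+2), _ =>
      have hsub : Reach ((m+2 : Nat) : Int) (mRec (m+1) + 1) := by
        refine Reach.sub1 (by push_cast; omega) ?_
        have h := ih (m+1) (by omega) (by omega)
        have he : ((m+2 : Nat) : Int) - 1 = ((m+1 : Nat) : Int) := by push_cast; ring
        rwa [he]
      have hdiv2 : (m+2) % 2 = 0 → Reach ((m+2 : Nat) : Int) (mRec ((m+2)/2) + 1) := by
        intro h2
        refine Reach.div2 ((mod2_nat (m+2)).2 h2) ?_
        rw [fdiv2_nat (m+2)]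
        exact ih ((m+2)/2) (Nat.div_lt_self (by omega) (by omega)) (by omega)
      have hdiv3 : (m+2) % 3 = 0 → Reach ((m+2 : Nat) : Int) (mRec ((m+2)/3) + 1) := by
        intro h3
        refine Reach.div3 ((mod3_nat (m+2)).2 h3) ?_
        rw [fdiv3_nat (m+2)]
        exact ih ((m+2)/3) (Nat.div_lt_self (by omega) (by omega)) (by omega)
      rw [mRec_two]
      simp only
      by_cases h2 : (m+2) % 2 = 0 <;> by_cases h3 : (m+2) % 3 = 0 <;>
        simp only [h2, h3, if_true, if_false]
      · rcases Nat.le_total (min (mRec (m+1) + 1) (mRec ((m+2)/2) + 1)) (mRec ((m+2)/3) + 1) with h | h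
        · rw [min_eq_left h]
          rcases Nat.le_total (mRec (m+1) + 1) (mRec ((m+2)/2) + 1) with h' | h'
          · rw [min_eq_left h']; exact hsub
          · rw [min_eq_right h']; exact hdiv2 h2
        · rw [min_eq_right h]; exact hdiv3 h3
      · rcases Nat.le_total (mRec (m+1) + 1) (mRec ((m+2)/2) + 1) with h' | h'
        · rw [min_eq_left h']; exact hsub
        · rw [min_eq_right h']; exact hdiv2 h2
      · rcases Nat.le_total (mRec (m+1) + 1) (mRec ((m+2)/3) + 1) with h' | h'
        · rw [min_eq_left h']; exact hsub
        · rw [min_eq_right h']; exact hdiv3 h3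
      · exact hsub

lemma m_le_sub1 (m : Nat) (h : 2 ≤ m) : mRec m ≤ mRec (m-1) + 1 := by
  obtain ⟨t, rfl⟩ : ∃ t, m = t + 2 := ⟨m - 2, by omega⟩
  rw [mRec_two]
  simp only
  split_ifs <;>
    simp only [show t + 2 - 1 = t + 1 from rfl] <;>
    first
      | exact le_trans (min_le_left _ _) (le_trans (min_le_left _ _) le_rfl)
      | exact le_trans (min_le_left _ _) le_rfl
      | exact le_rfl

lemma m_le_div2 (m : Nat) (h : 2 ≤ m) (h2 : m % 2 = 0) : mRec m ≤ mRec (m/2) + 1 := by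
  obtain ⟨t, rfl⟩ : ∃ t, m = t + 2 := ⟨m - 2, by omega⟩
  rw [mRec_two]
  simp only
  rw [if_pos h2]
  split_ifs
  · exact le_trans (min_le_left _ _) (min_le_right _ _)
  · exact min_le_right _ _

lemma m_le_div3 (m : Nat) (h : 2 ≤ m) (h3 : m % 3 = 0) : mRec m ≤ mRec (m/3) + 1 := by
  obtain ⟨t, rfl⟩ : ∃ t, m = t + 2 := ⟨m - 2, by omega⟩
  rw [mRec_two]
  simp only
  rw [if_pos h3]
  exact min_le_right _ _

lemma m_le_reach : ∀ {x : Int} {k : Nat}, Reach x k → mRec x.toNat ≤ k := by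
  intro x k h
  induction h with
  | one => simp [mRec]
  | @div3 x k hm hr ih =>
      have hx1 : 1 ≤ PySem.Int.floordiv x 3 := reach_pos hr
      have hx : 3 ≤ x := by
        have := PySem.Int.floordiv_mul_add_mod x 3
        omega
      have hfd := fdiv3_eq x (by omega)
      have hm' : x.toNat % 3 = 0 := (mod3_iff x (by omega)).1 hm
      have : mRec x.toNat ≤ mRec (x.toNat / 3) + 1 := m_le_div3 _ (by omega) hm'
      have hcast : (PySem.Int.floordiv x 3).toNat = x.toNat / 3 := by rw [hfd]; omega
      rw [hcast] at ih
      omega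
  | @div2 x k hm hr ih =>
      have hx1 : 1 ≤ PySem.Int.floordiv x 2 := reach_pos hr
      have hx : 2 ≤ x := by
        have := PySem.Int.floordiv_mul_add_mod x 2
        omega
      have hfd := fdiv2_eq x (by omega)
      have hm' : x.toNat % 2 = 0 := (mod2_iff x (by omega)).1 hm
      have : mRec x.toNat ≤ mRec (x.toNat / 2) + 1 := m_le_div2 _ (by omega) hm'
      have hcast : (PySem.Int.floordiv x 2).toNat = x.toNat / 2 := by rw [hfd]; omega
      rw [hcast] at ih
      omega
  | @sub1 x k hp hr ih =>
      have : mRec x.toNat ≤ mRec (x.toNat - 1) + 1 := m_le_sub1 _ (by omega)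
      have hcast : (x - 1).toNat = x.toNat - 1 := by omega
      rw [hcast] at ih
      omega

lemma m_bound : ∀ n : Nat, 1 ≤ n → mRec n ≤ n - 1 := by
  intro n
  induction n using Nat.strong_induction_on with
  | _ n ih =>
    intro hn
    match n, hn with
    | 1, _ => simp [mRec]
    | (m+2), _ =>
      have h1 := m_le_sub1 (m+2) (by omega)
      rw [show m+2-1 = m+1 from rfl] at h1
      have h2 := ih (m+1) (by omega) (by omega)
      omega

-- the successors a single element contributes to the next layer, in append order
def succs (x : Int) : List Int :=
  (if PySem.Int.mod x 3 = 0 then [PySem.Int.floordiv x 3] else []) ++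
  (if PySem.Int.mod x 2 = 0 then [PySem.Int.floordiv x 2] else []) ++
  (if x - 1 > 0 then [x - 1] else [])

lemma nextLayer_eq_flatMap (L : List Int) : nextLayer L = L.flatMap succs := by
  unfold nextLayer
  have hbody : ∀ (acc : List Int) (x : Int),
      (let acc1 := if PySem.Int.mod x 3 = 0 then acc ++ [PySem.Int.floordiv x 3] else acc
       let acc2 := if PySem.Int.mod x 2 = 0 then acc1 ++ [PySem.Int.floordiv x 2] else acc1
       if x - 1 > 0 then acc2 ++ [x - 1] else acc2) = acc ++ succs x := by
    intro acc x
    simp only [succs]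
    split_ifs <;> simp
  calc L.foldl (fun acc x =>
        let acc1 := if PySem.Int.mod x 3 = 0 then acc ++ [PySem.Int.floordiv x 3] else acc
        let acc2 := if PySem.Int.mod x 2 = 0 then acc1 ++ [PySem.Int.floordiv x 2] else acc1
        if x - 1 > 0 then acc2 ++ [x - 1] else acc2) []
      = L.foldl (fun acc x => acc ++ succs x) [] := by
        congr 1
        funext acc x
        exact hbody acc x
    _ = [] ++ L.flatMap succs := PySem.List.foldl_append_eq_flatMap succs L []
    _ = L.flatMap succs := by simp

lemma mem_succs {x y : Int} : y ∈ succs x ↔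
    (PySem.Int.mod x 3 = 0 ∧ y = PySem.Int.floordiv x 3) ∨
    (PySem.Int.mod x 2 = 0 ∧ y = PySem.Int.floordiv x 2) ∨
    (x - 1 > 0 ∧ y = x - 1) := by
  simp only [succs]
  split_ifs <;> simp_all <;> omega

lemma reach_next (L : List Int) (t : Nat) :
    (∃ y ∈ nextLayer L, Reach y t) ↔ (∃ x ∈ L, Reach x (t+1)) := by
  rw [nextLayer_eq_flatMap]
  constructor
  · rintro ⟨y, hy, hr⟩
    rw [List.mem_flatMap] at hy
    obtain ⟨x, hx, hyx⟩ := hy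
    rcases mem_succs.1 hyx with ⟨h, rfl⟩ | ⟨h, rfl⟩ | ⟨h, rfl⟩
    · exact ⟨x, hx, Reach.div3 h hr⟩
    · exact ⟨x, hx, Reach.div2 h hr⟩
    · exact ⟨x, hx, Reach.sub1 h hr⟩
  · rintro ⟨x, hx, hr⟩
    cases hr with
    | div3 h hr' => exact ⟨_, List.mem_flatMap.2 ⟨x, hx, mem_succs.2 (Or.inl ⟨h, rfl⟩)⟩, hr'⟩
    | div2 h hr' => exact ⟨_, List.mem_flatMap.2 ⟨x, hx, mem_succs.2 (Or.inr (Or.inl ⟨h, rfl⟩))⟩, hr'⟩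
    | sub1 h hr' => exact ⟨_, List.mem_flatMap.2 ⟨x, hx, mem_succs.2 (Or.inr (Or.inr ⟨h, rfl⟩))⟩, hr'⟩

lemma reach_zero {x : Int} (h : Reach x 0) : x = 1 := by cases h; rfl

lemma loopA_spec : ∀ (fuel : Nat) (L : List Int) (i : Int) (k : Nat), k < fuel →
    (∃ x ∈ L, Reach x k) → (∀ j, j < k → ¬ ∃ x ∈ L, Reach x j) →
    loopA L i fuel = i + k := by
  intro fuel
  induction fuel with
  | zero => intro L i k hk; omega
  | succ f ih =>
    intro L i k hk hex hmin
    cases k with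
    | zero =>
      obtain ⟨x, hx, hr⟩ := hex
      have : x = 1 := reach_zero hr
      subst this
      simp [loopA, hx]
    | succ j =>
      have h1 : ¬ ((1 : Int) ∈ L) := by
        intro h1
        exact hmin 0 (by omega) ⟨1, h1, Reach.one⟩
      rw [loopA, if_neg h1]
      have hex' : ∃ y ∈ nextLayer L, Reach y j := (reach_next L j).2 hex
      have hmin' : ∀ t, t < j → ¬ ∃ y ∈ nextLayer L, Reach y t := by
        intro t ht hc
        exact hmin (t+1) (by omega) ((reach_next L t).1 hc)
      rw [ih (nextLayer L) (i+1) j (by omega) hex' hmin']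
      push_cast
      ring

lemma solution_eq_m (n : Int) (hn : 1 ≤ n) : solution n = ((mRec n.toNat : Nat) : Int) := by
  unfold solution
  have hcast : ((n.toNat : Nat) : Int) = n := by omega
  have hex : ∃ x ∈ [n], Reach x (mRec n.toNat) := by
    refine ⟨n, by simp, ?_⟩
    have := reach_m n.toNat (by omega)
    rwa [hcast] at this
  have hmin : ∀ j, j < mRec n.toNat → ¬ ∃ x ∈ [n], Reach x j := by
    rintro j hj ⟨x, hx, hr⟩
    simp only [List.mem_singleton] at hx
    subst hx
    have := m_le_reach hr
    omega
  have hb := m_bound n.toNat (by omega)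
  rw [loopA_spec (n.toNat + 1) [n] 0 (mRec n.toNat) (by omega) hex hmin]
  ring

-- B's dp array after the iterations i = 2, …, t+1 of the loop
def Gdp : Nat → Array Int
  | 0 => #[0, 0]
  | t+1 => dpStep (Gdp t) (2 + (t : Int))

lemma Gdp_size : ∀ t : Nat, (Gdp t).size = t + 2 := by
  intro t
  induction t with
  | zero => rfl
  | succ t ih => simp [Gdp, dpStep, ih]

lemma foldl_range_eq : ∀ t : Nat,
    (PySem.List.pyRange 2 (2 + (t : Int)) 1).foldl dpStep #[0, 0] = Gdp t := by
  intro t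
  induction t with
  | zero => rw [show ((2 : Int) + ((0 : Nat) : Int)) = 2 by norm_num,
                PySem.List.pyRange_one_eq_nil le_rfl]; rfl
  | succ t ih =>
    have : (2 : Int) + ((t + 1 : Nat) : Int) = (2 + (t : Int)) + 1 := by push_cast; ring
    rw [this, PySem.List.pyRange_one_succ_right (by omega), List.foldl_append, ih]
    rfl

lemma getD_push_lt (a : Array Int) (v : Int) (j : Nat) (h : j < a.size) :
    (a.push v).getD j 0 = a.getD j 0 := by
  have h1 : j < (a.push v).size := by simp; omega
  rw [Array.getD_eq_getD_getElem?, Array.getD_eq_getD_getElem?]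
  rw [Array.getElem?_eq_getElem h1, Array.getElem?_eq_getElem h]
  simp [Array.getElem_push, h]

lemma getD_push_eq (a : Array Int) (v : Int) :
    (a.push v).getD a.size 0 = v := by
  have h1 : a.size < (a.push v).size := by simp
  rw [Array.getD_eq_getD_getElem?, Array.getElem?_eq_getElem h1]
  simp [Array.getElem_push]

lemma getD_push_eq' (a : Array Int) (v : Int) (j : Nat) (hj : j = a.size) :
    (a.push v).getD j 0 = v := by
  subst hj; exact getD_push_eq a v

lemma Gdp_spec : ∀ t : Nat, ∀ j : Nat, j ≤ t + 1 → (Gdp t).getD j 0 = ((mRec j : Nat) : Int) := by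
  intro t
  induction t with
  | zero =>
    intro j hj
    interval_cases j <;> simp [Gdp, mRec, Array.getD]
  | succ t ih =>
    intro j hj
    have hsize := Gdp_size t
    rcases Nat.lt_or_ge j (t + 2) with hlt | hge
    · -- old entries are unchanged by push
      show (dpStep (Gdp t) (2 + (t : Int))).getD j 0 = _
      unfold dpStep
      simp only
      rw [getD_push_lt _ _ j (by omega)]
      exact ih j (by omega)
    · -- j = t + 2 : the pushed value is mRec (t+2)
      have hj2 : j = t + 2 := by omega
      subst hj2
      show (dpStep (Gdp t) (2 + (t : Int))).getD (t + 2) 0 = _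
      unfold dpStep
      simp only
      have hsz : (Gdp t).size = t + 2 := hsize
      rw [getD_push_eq' (Gdp t) _ (t + 2) hsz.symm]
      -- identify the three lookups
      have e1 : ((2 + (t : Int)) - 1).toNat = t + 1 := by omega
      have e2 : PySem.Int.mod (2 + (t : Int)) 2 = 0 ↔ (t + 2) % 2 = 0 := by
        rw [mod2_iff _ (by omega)]
        constructor <;> intro h <;> omega
      have e3 : PySem.Int.mod (2 + (t : Int)) 3 = 0 ↔ (t + 2) % 3 = 0 := by
        rw [mod3_iff _ (by omega)]
        constructor <;> intro h <;> omega
      have f2 : (PySem.Int.floordiv (2 + (t : Int)) 2).toNat = (t + 2) / 2 := by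
        rw [fdiv2_eq _ (by omega)]; omega
      have f3 : (PySem.Int.floordiv (2 + (t : Int)) 3).toNat = (t + 2) / 3 := by
        rw [fdiv3_eq _ (by omega)]; omega
      have g1 : (Gdp t).getD (t + 1) 0 = ((mRec (t+1) : Nat) : Int) := ih (t+1) (by omega)
      have g2 : (Gdp t).getD ((t + 2) / 2) 0 = ((mRec ((t+2)/2) : Nat) : Int) :=
        ih ((t+2)/2) (by omega)
      have g3 : (Gdp t).getD ((t + 2) / 3) 0 = ((mRec ((t+2)/3) : Nat) : Int) :=
        ih ((t+2)/3) (by omega)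
      rw [e1, g1, mRec_two]
      simp only [e2, e3, f2, f3, g2, g3]
      by_cases h2 : (t + 2) % 2 = 0 <;> by_cases h3 : (t + 2) % 3 = 0 <;>
        simp only [h2, h3, if_true, if_false] <;>
        push_cast <;> rfl

lemma solution_alt_eq_m (n : Int) (hn : 1 ≤ n) : solution_alt n = ((mRec n.toNat : Nat) : Int) := by
  unfold solution_alt
  by_cases h1 : n ≤ 1
  · have : n = 1 := by omega
    subst this
    simp [mRec]
  · rw [if_neg h1]
    have ht : (2 : Int) + ((n.toNat - 1 : Nat) : Int) = n + 1 := by omega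
    rw [← ht, foldl_range_eq]
    exact Gdp_spec (n.toNat - 1) n.toNat (by omega)

-- ===== VERDICT (by name: the statement is the Claim_ definition above) =====
theorem solution_spec : Claim_equal_solution := by
  intro n _ hpre
  unfold Spec_solution
  rw [solution_eq_m n hpre, solution_alt_eq_m n hpre]
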